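-- pv_equiv track=rewrite | github.com/melcatwork/swarm-tm-backend | app/swarm/output_filter.py | _is_path_evidence_grounded
-- ===== SOURCE A (Python) =====
-- from typing import List, Dict, Set
--
-- def _is_path_evidence_grounded(
--     path: dict,
--     confirmed_vuln_ids: Set[str],
--     confirmed_technique_ids: Set[str],
-- ) -> bool:
--     """
--     Returns True if a path references evidence from confirmed
--     vulnerability findings. Checks structural properties —
--     vuln_id references and technique_id overlaps — not content.
--     """
--     steps = path.get('steps', [])
--     path_techniques = {
--         s.get('technique_id', '') for s in steps
--         if s.get('technique_id')
--     }
--     path_vuln_refs = {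
--         s.get('vuln_id', '') for s in steps
--         if s.get('vuln_id')
--     }
--     return bool(
--         path_vuln_refs & confirmed_vuln_ids
--         or path_techniques & confirmed_technique_ids
--     )
-- ===== SOURCE B (Python) =====
-- def _is_path_evidence_grounded(
--     path: dict,
--     confirmed_vuln_ids,
--     confirmed_technique_ids,
-- ) -> bool:
--     for s in path.get('steps', []):
--         vid = s.get('vuln_id')
--         tid = s.get('technique_id')
--         if (vid and vid in confirmed_vuln_ids) or (tid and tid in confirmed_technique_ids):
--             return True
--     return False
-- ===== Notes on version B (the rewrite author's own statement) =====
-- stated objective: simpler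
-- what changed: Replaced the build-two-sets-then-intersect pipeline with a single short-circuit scan over the steps that returns True on the first step whose vuln_id or technique_id is confirmed.
import Mathlib
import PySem

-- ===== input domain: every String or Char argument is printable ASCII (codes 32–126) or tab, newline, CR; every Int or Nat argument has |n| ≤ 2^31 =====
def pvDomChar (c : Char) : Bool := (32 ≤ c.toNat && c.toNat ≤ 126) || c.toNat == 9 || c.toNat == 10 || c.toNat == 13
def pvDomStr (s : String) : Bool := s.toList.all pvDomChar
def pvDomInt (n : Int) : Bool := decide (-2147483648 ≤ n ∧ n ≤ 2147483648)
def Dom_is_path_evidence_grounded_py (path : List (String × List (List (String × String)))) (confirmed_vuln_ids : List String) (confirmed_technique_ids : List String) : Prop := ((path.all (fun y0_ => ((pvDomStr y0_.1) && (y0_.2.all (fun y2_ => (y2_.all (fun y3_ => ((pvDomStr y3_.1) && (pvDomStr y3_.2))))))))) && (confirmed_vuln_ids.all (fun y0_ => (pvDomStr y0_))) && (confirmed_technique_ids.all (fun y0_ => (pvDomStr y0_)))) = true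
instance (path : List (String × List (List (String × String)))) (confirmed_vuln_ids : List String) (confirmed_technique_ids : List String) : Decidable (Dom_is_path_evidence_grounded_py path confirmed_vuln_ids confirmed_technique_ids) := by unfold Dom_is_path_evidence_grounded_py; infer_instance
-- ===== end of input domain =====

-- B replaces A's build-two-sets-then-intersect with a single short-circuit scan over the steps (simpler; return value only).


-- ===== PORT A =====
-- A transliterated: steps = path.get('steps', []); two set comprehensions; intersect and bool().
def is_path_evidence_grounded_py (path : List (String × List (List (String × String)))) (confirmed_vuln_ids : List String) (confirmed_technique_ids : List String) : Bool :=
  let steps := PySem.Dict.getD (PySem.Dict.mk path) "steps" []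
  let path_techniques : PySem.Set String :=
    PySem.Set.ofList ((steps.filter (fun s => (PySem.Dict.getD (PySem.Dict.mk s) "technique_id" "") ≠ "")).map
      (fun s => PySem.Dict.getD (PySem.Dict.mk s) "technique_id" ""))
  let path_vuln_refs : PySem.Set String :=
    PySem.Set.ofList ((steps.filter (fun s => (PySem.Dict.getD (PySem.Dict.mk s) "vuln_id" "") ≠ "")).map
      (fun s => PySem.Dict.getD (PySem.Dict.mk s) "vuln_id" ""))
  -- bool(X or Y) for two sets = X nonempty or Y nonempty
  !(PySem.Set.inter path_vuln_refs confirmed_vuln_ids).isEmpty ||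
    !(PySem.Set.inter path_techniques confirmed_technique_ids).isEmpty

-- ===== PORT B =====
-- B transliterated: one short-circuit pass over the steps (List.any), no set construction.
def is_path_evidence_grounded_py_alt (path : List (String × List (List (String × String)))) (confirmed_vuln_ids : List String) (confirmed_technique_ids : List String) : Bool :=
  (PySem.Dict.getD (PySem.Dict.mk path) "steps" []).any (fun s =>
    (match PySem.Dict.get? (PySem.Dict.mk s) "vuln_id" with
      | some v => v ≠ "" && PySem.Set.contains confirmed_vuln_ids v
      | none => false) ||
    (match PySem.Dict.get? (PySem.Dict.mk s) "technique_id" with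
      | some t => t ≠ "" && PySem.Set.contains confirmed_technique_ids t
      | none => false))

-- ===== PRECONDITION & SPEC =====
def Spec_is_path_evidence_grounded_py (path : List (String × List (List (String × String)))) (confirmed_vuln_ids : List String) (confirmed_technique_ids : List String) (out : Bool) : Prop := out = is_path_evidence_grounded_py_alt path confirmed_vuln_ids confirmed_technique_ids
instance (path : List (String × List (List (String × String)))) (confirmed_vuln_ids : List String) (confirmed_technique_ids : List String) (out : Bool) : Decidable (Spec_is_path_evidence_grounded_py path confirmed_vuln_ids confirmed_technique_ids out) := by unfold Spec_is_path_evidence_grounded_py; infer_instance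

-- ===== CLAIM (what is proved, stated in full; the proofs are below) =====
def Claim_equal_is_path_evidence_grounded_py : Prop := ∀ (path : List (String × List (List (String × String)))) (confirmed_vuln_ids : List String) (confirmed_technique_ids : List String), Dom_is_path_evidence_grounded_py path confirmed_vuln_ids confirmed_technique_ids → Spec_is_path_evidence_grounded_py path confirmed_vuln_ids confirmed_technique_ids (is_path_evidence_grounded_py path confirmed_vuln_ids confirmed_technique_ids)

-- ===== LEMMAS AND PROOFS =====

-- ===== VERDICT (by name: the statement is the Claim_ definition above) =====
-- match on dict.get(k) (None default) rewritten to the getD "" form used by A's comprehensions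
theorem pv_match_getD (o : Option String) (c : List String) :
    (match o with
      | some v => decide (v ≠ "") && PySem.Set.contains c v
      | none => false)
    = (decide (o.getD "" ≠ "") && PySem.Set.contains c (o.getD "")) := by
  cases o <;> simp

theorem is_path_evidence_grounded_py_spec : Claim_equal_is_path_evidence_grounded_py := by
  intro path cv ct _
  unfold Spec_is_path_evidence_grounded_py
  simp only [is_path_evidence_grounded_py, is_path_evidence_grounded_py_alt, pv_match_getD,
    PySem.Dict.getD_eq_get?_getD]
  apply Bool.eq_iff_iff.mpr
  simp only [Bool.or_eq_true, Bool.not_eq_true', List.isEmpty_eq_false_iff_exists_mem,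
    PySem.Set.mem_inter, PySem.Set.mem_ofList, List.mem_map, List.mem_filter,
    List.any_eq_true, Bool.and_eq_true, decide_eq_true_eq, PySem.Set.contains_iff]
  constructor
  · rintro (⟨x, ⟨⟨s, ⟨hs, hne⟩, hx⟩, hc⟩⟩ | ⟨x, ⟨⟨s, ⟨hs, hne⟩, hx⟩, hc⟩⟩)
    · exact ⟨s, hs, Or.inl ⟨by simpa [hx] using hne, by simpa [hx] using hc⟩⟩
    · exact ⟨s, hs, Or.inr ⟨by simpa [hx] using hne, by simpa [hx] using hc⟩⟩
  · rintro ⟨s, hs, (⟨hne, hc⟩ | ⟨hne, hc⟩)⟩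
    · exact Or.inl ⟨_, ⟨s, ⟨hs, hne⟩, rfl⟩, hc⟩
    · exact Or.inr ⟨_, ⟨s, ⟨hs, hne⟩, rfl⟩, hc⟩
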